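-- pv_equiv track=rewrite | github.com/AubakirovArman/workspace2 | app_core/services/realtime_session.py | _ensure_sdp_directions
-- ===== SOURCE A (Python) =====
-- from typing import Any, Coroutine, Iterable, List, Optional, Tuple, TypeVar
--
-- _DIRECTION_LINES = {"a=sendrecv", "a=sendonly", "a=recvonly", "a=inactive"}
--
-- def _ensure_sdp_directions(sdp: str) -> str:
--     """Ensure each media section has a direction attribute and validate SDP."""
--     lines = [line for line in sdp.replace("\r\n", "\n").split("\n") if line != ""]
--     normalized: List[str] = []
--     in_media = False
--     media_has_direction = False
--     media_indices: List[int] = []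
--
--     for line in lines:
--         if line.startswith("m="):
--             if in_media and not media_has_direction:
--                 normalized.append("a=sendrecv")
--             in_media = True
--             media_has_direction = False
--             media_indices.append(len(normalized))
--             normalized.append(line)
--             continue
--
--         if in_media and line in _DIRECTION_LINES:
--             media_has_direction = True
--
--         normalized.append(line)
--
--     if in_media and not media_has_direction:
--         normalized.append("a=sendrecv")
--
--     if not media_indices:
--         raise RuntimeError("Invalid SDP offer: no media sections provided")
--
--     return "\r\n".join(normalized) + "\r\n"
-- ===== SOURCE B (Python) =====
-- _DIRECTION_LINES = {"a=sendrecv", "a=sendonly", "a=recvonly", "a=inactive"}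
--
--
-- def _finish(section):
--     """A completed media section: append a=sendrecv if it has no direction line."""
--     if any(l in _DIRECTION_LINES for l in section):
--         return section
--     return section + ["a=sendrecv"]
--
--
-- def _ensure_sdp_directions(sdp: str) -> str:
--     lines = [l for l in sdp.replace("\r\n", "\n").split("\n") if l != ""]
--     out = []
--     section = []          # preamble first, then the current media section
--     seen_media = False
--     for line in lines:
--         if line.startswith("m="):
--             # flush: the preamble goes out as-is, media sections via _finish
--             out.extend(_finish(section) if seen_media else section)
--             section = []
--             seen_media = True
--         section.append(line)
--     if not seen_media:
--         raise RuntimeError("Invalid SDP offer: no media sections provided")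
--     out.extend(_finish(section))
--     return "\r\n".join(out) + "\r\n"
-- ===== Notes on version B (the rewrite author's own statement) =====
-- stated objective: alternative
-- what changed: Replaced the stateful one-pass with in_media/media_has_direction flags and patch-on-next-m= insertion by a group-then-process shape: lines are grouped into a preamble and per-media sections, and each completed section is flushed through _finish, which appends a=sendrecv exactly when the section contains no direction line. Pre_ excludes inputs with no m= line, where both A and B raise the same RuntimeError.
import Mathlib
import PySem

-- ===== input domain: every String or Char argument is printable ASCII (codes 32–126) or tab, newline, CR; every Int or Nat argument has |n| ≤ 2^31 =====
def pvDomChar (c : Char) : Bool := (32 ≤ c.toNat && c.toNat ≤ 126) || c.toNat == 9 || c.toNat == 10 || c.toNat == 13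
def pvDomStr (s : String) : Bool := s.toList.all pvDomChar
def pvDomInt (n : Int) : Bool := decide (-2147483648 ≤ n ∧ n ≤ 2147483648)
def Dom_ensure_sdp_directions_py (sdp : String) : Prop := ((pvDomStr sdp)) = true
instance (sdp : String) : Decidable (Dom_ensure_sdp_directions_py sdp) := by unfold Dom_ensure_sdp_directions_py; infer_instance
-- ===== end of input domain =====

-- B restructures A's stateful single pass (in_media/media_has_direction flags, direction fix
-- inserted at the NEXT m= line) into a group-then-process shape: lines are flushed per media
-- section, each section finished by appending a=sendrecv when it has no direction line.

-- _DIRECTION_LINES = {"a=sendrecv", "a=sendonly", "a=recvonly", "a=inactive"}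
def pvDirLines : PySem.Set String :=
  PySem.Set.ofList ["a=sendrecv", "a=sendonly", "a=recvonly", "a=inactive"]

-- lines = [line for line in sdp.replace("\r\n", "\n").split("\n") if line != ""]
def pvCleanLines (sdp : String) : List String :=
  ((PySem.Str.split? (PySem.Str.replace sdp "\r\n" "\n") "\n").getD []).filter (fun l => l != "")

-- ===== PORT A =====
-- the body of A's for-loop; state = (normalized, in_media, media_has_direction, media_indices)
def pvStepA (st : List String × Bool × Bool × List Int) (line : String) :
    List String × Bool × Bool × List Int :=
  let (normalized, in_media, media_has_direction, media_indices) := st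
  if PySem.Str.startswith line "m=" then
    let normalized := if in_media && !media_has_direction then normalized ++ ["a=sendrecv"]
                      else normalized
    (normalized ++ [line], true, false, media_indices ++ [(normalized.length : Int)])
  else
    (normalized ++ [line], in_media,
     media_has_direction || (in_media && PySem.Set.contains pvDirLines line), media_indices)

def ensure_sdp_directions_py (sdp : String) : String :=
  let st := (pvCleanLines sdp).foldl pvStepA ([], false, false, [])
  -- st = (normalized, in_media, media_has_direction, media_indices)
  let normalized := if st.2.1 && !st.2.2.1 then st.1 ++ ["a=sendrecv"] else st.1
  -- 'if not media_indices: raise RuntimeError(...)' — those inputs are excluded by Pre_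
  PySem.Str.join "\r\n" normalized ++ "\r\n"

-- ===== PORT B =====
-- def _finish(section)
def pvFinish (sect : List String) : List String :=
  if sect.any (fun l => PySem.Set.contains pvDirLines l) then sect
  else sect ++ ["a=sendrecv"]

-- the body of B's for-loop; state = (out, section, seen_media)
def pvStepB (st : List String × List String × Bool) (line : String) :
    List String × List String × Bool :=
  let (out, sect, seen_media) := st
  if PySem.Str.startswith line "m=" then
    (out ++ (if seen_media then pvFinish sect else sect), [line], true)
  else
    (out, sect ++ [line], seen_media)

def ensure_sdp_directions_py_alt (sdp : String) : String :=
  let st := (pvCleanLines sdp).foldl pvStepB ([], [], false)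
  -- st = (out, section, seen_media); 'if not seen_media: raise' — excluded by Pre_
  PySem.Str.join "\r\n" (st.1 ++ pvFinish st.2.1) ++ "\r\n"

-- ===== PRECONDITION & SPEC =====
-- Pre_ excludes exactly the inputs with no media ('m=') line, on which A (and B alike)
-- raises RuntimeError("Invalid SDP offer: no media sections provided").
def Pre_ensure_sdp_directions_py (sdp : String) : Prop :=
  (pvCleanLines sdp).any (fun l => PySem.Str.startswith l "m=") = true
instance (sdp : String) : Decidable (Pre_ensure_sdp_directions_py sdp) := by
  unfold Pre_ensure_sdp_directions_py; infer_instance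
def pvWitness_ensure_sdp_directions_py : String := "v=0\nm=audio 9 RTP 0\na=mid:0\n"

def Spec_ensure_sdp_directions_py (sdp : String) (out : String) : Prop :=
  out = ensure_sdp_directions_py_alt sdp
instance (sdp : String) (out : String) : Decidable (Spec_ensure_sdp_directions_py sdp out) := by
  unfold Spec_ensure_sdp_directions_py; infer_instance

-- ===== CLAIM (what is proved, stated in full; the proofs are below) =====
def Claim_equal_ensure_sdp_directions_py : Prop := ∀ (sdp : String), Dom_ensure_sdp_directions_py sdp → Pre_ensure_sdp_directions_py sdp → Spec_ensure_sdp_directions_py sdp (ensure_sdp_directions_py sdp)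

-- ===== LEMMAS AND PROOFS =====

-- an 'm=' line is never a direction line
lemma pv_mline_not_dir (l : String) (h : PySem.Str.startswith l "m=" = true) :
    l ∉ pvDirLines := by
  intro hm
  have hm' : l ∈ (["a=sendrecv", "a=sendonly", "a=recvonly", "a=inactive"] : List String) := by
    simpa [pvDirLines, PySem.Set.ofList, PySem.Set.add] using hm
  fin_cases hm' <;> exact absurd h (by decide)

-- preamble phase: before any 'm=' line, A only copies lines, B only accumulates them
lemma pv_preA (P : List String) (norm : List String) (idx : List Int)
    (h : ∀ l ∈ P, PySem.Str.startswith l "m=" = false) :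
    P.foldl pvStepA (norm, false, false, idx) = (norm ++ P, false, false, idx) := by
  induction P generalizing norm with
  | nil => simp
  | cons p P ih =>
    have hp := h p (by simp)
    simp only [List.foldl_cons, pvStepA, hp]
    simpa using ih (norm ++ [p]) (fun l hl => h l (by simp [hl]))

lemma pv_preB (P : List String) (out sect : List String)
    (h : ∀ l ∈ P, PySem.Str.startswith l "m=" = false) :
    P.foldl pvStepB (out, sect, false) = (out, sect ++ P, false) := by
  induction P generalizing sect with
  | nil => simp
  | cons p P ih =>
    have hp := h p (by simp)
    simp only [List.foldl_cons, pvStepB, hp]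
    simpa using ih (sect ++ [p]) (fun l hl => h l (by simp [hl]))

-- main loop invariant: once inside the first media section, A's running 'normalized' is
-- B's flushed 'out' plus the current section, and A's flag says 'section has a direction line'
lemma pv_loop_eq (ls : List String) (out sect norm : List String) (dir : Bool)
    (idx : List Int)
    (hs : sect ≠ [])
    (hn : norm = out ++ sect)
    (hd : dir = sect.any (fun l => PySem.Set.contains pvDirLines l)) :
    (let stA := ls.foldl pvStepA (norm, true, dir, idx)
     if stA.2.1 && !stA.2.2.1 then stA.1 ++ ["a=sendrecv"] else stA.1)
    = (let stB := ls.foldl pvStepB (out, sect, true)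
       stB.1 ++ pvFinish stB.2.1) := by
  induction ls generalizing out sect norm dir idx with
  | nil =>
    subst hn hd
    simp only [List.foldl_nil, pvFinish]
    cases ha : sect.any (fun l => PySem.Set.contains pvDirLines l) <;>
      simp [List.append_assoc]
  | cons l ls ih =>
    by_cases hl : PySem.Str.startswith l "m=" = true
    · simp only [List.foldl_cons, pvStepA, pvStepB, hl, if_pos]
      refine ih _ _ _ _ _ (by simp) ?_ ?_
      · subst hn hd
        simp only [pvFinish]
        cases ha : sect.any (fun l => PySem.Set.contains pvDirLines l) <;>
          simp [List.append_assoc]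
      · simp [pv_mline_not_dir l hl]
    · rw [Bool.not_eq_true] at hl
      simp only [List.foldl_cons, pvStepA, pvStepB, hl]
      refine ih _ _ _ _ _ (by simp [hs]) (by simp [hn, List.append_assoc]) ?_
      simp [hd, List.any_append, Bool.or_comm]

-- ===== VERDICT (by name: the statement is the Claim_ definition above) =====
theorem ensure_sdp_directions_py_spec : Claim_equal_ensure_sdp_directions_py := by
  intro sdp _ hpre
  unfold Spec_ensure_sdp_directions_py ensure_sdp_directions_py ensure_sdp_directions_py_alt
  unfold Pre_ensure_sdp_directions_py at hpre
  revert hpre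
  generalize pvCleanLines sdp = L
  intro hpre
  have hsplit := List.takeWhile_append_dropWhile
    (p := fun l => !PySem.Str.startswith l "m=") (l := L)
  have hq : ∀ l ∈ L.takeWhile (fun l => !PySem.Str.startswith l "m="),
      PySem.Str.startswith l "m=" = false := by
    intro l hl
    have := List.mem_takeWhile_imp hl
    simpa using this
  cases hrest : L.dropWhile (fun l => !PySem.Str.startswith l "m=") with
  | nil =>
    exfalso
    rw [List.dropWhile_eq_nil_iff] at hrest
    rcases List.any_eq_true.mp hpre with ⟨l, hl, hml⟩
    have h2 := hrest l hl
    rw [hml] at h2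
    simp at h2
  | cons m tail =>
    have hm : PySem.Str.startswith m "m=" = true := by
      have h2 := List.head?_dropWhile_not (fun l => !PySem.Str.startswith l "m=") L
      rw [hrest] at h2
      simpa using h2
    have hm' : PySem.Chars.startswith m.toList ['m', '='] = true := by simpa using hm
    rw [← hsplit, hrest]
    rw [List.foldl_append, List.foldl_append]
    rw [pv_preA _ _ _ hq, pv_preB _ _ _ hq]
    simp only [List.nil_append, List.foldl_cons]
    have hstepA : pvStepA (L.takeWhile (fun l => !PySem.Str.startswith l "m="),
        false, false, ([] : List Int)) m
        = (L.takeWhile (fun l => !PySem.Str.startswith l "m=") ++ [m], true,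
           false, [((L.takeWhile (fun l => !PySem.Str.startswith l "m=")).length : Int)]) := by
      simp [pvStepA, hm']
    have hstepB : pvStepB (([] : List String),
        L.takeWhile (fun l => !PySem.Str.startswith l "m="), false) m
        = (L.takeWhile (fun l => !PySem.Str.startswith l "m="), [m], true) := by
      simp [pvStepB, hm']
    rw [hstepA, hstepB]
    have key := pv_loop_eq tail
      (L.takeWhile (fun l => !PySem.Str.startswith l "m="))
      [m]
      (L.takeWhile (fun l => !PySem.Str.startswith l "m=") ++ [m])
      false
      [((L.takeWhile (fun l => !PySem.Str.startswith l "m=")).length : Int)]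
      (by simp) rfl (by simp [pv_mline_not_dir m hm])
    simp only at key
    rw [key]
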